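-- pv_equiv track=rewrite | github.com/shackett/shackett.github.io | scripts/clean_qmd_markdown.py | _find_code_block_pairs
-- ===== SOURCE A (Python) =====
-- from typing import List, Tuple
--
-- def _find_code_block_pairs(lines: List[str]) -> List[Tuple[int, int]]:
--     """
--     Find pairs of ``` lines that form code blocks.
--
--     Returns:
--         List of (start_line, end_line) tuples
--     """
--     tick_lines = []
--     for i, line in enumerate(lines):
--         if line.strip().startswith('```'):
--             tick_lines.append(i)
--
--     if len(tick_lines) % 2 != 0:
--         return []  # Can't pair odd number of ticks
--
--     return [(tick_lines[i], tick_lines[i + 1]) for i in range(0, len(tick_lines), 2)]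
-- ===== SOURCE B (Python) =====
-- from typing import List, Tuple
--
-- def _find_code_block_pairs(lines: List[str]) -> List[Tuple[int, int]]:
--     """Single-pass state machine: emit (start, end) pairs on the fly."""
--     pairs = []
--     start = None
--     for i, line in enumerate(lines):
--         if line.strip().startswith('```'):
--             if start is None:
--                 start = i
--             else:
--                 pairs.append((start, i))
--                 start = None
--     if start is not None:
--         return []  # an unmatched fence remains open: no valid pairing
--     return pairs
-- ===== Notes on version B (the rewrite author's own statement) =====
-- stated objective: simpler
-- what changed: Replaced the collect-all-indices pass plus odd-check plus stride-2 index comprehension with a single-pass state machine that pairs each closing fence with the pending opening fence as it is seen.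
import Mathlib
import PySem

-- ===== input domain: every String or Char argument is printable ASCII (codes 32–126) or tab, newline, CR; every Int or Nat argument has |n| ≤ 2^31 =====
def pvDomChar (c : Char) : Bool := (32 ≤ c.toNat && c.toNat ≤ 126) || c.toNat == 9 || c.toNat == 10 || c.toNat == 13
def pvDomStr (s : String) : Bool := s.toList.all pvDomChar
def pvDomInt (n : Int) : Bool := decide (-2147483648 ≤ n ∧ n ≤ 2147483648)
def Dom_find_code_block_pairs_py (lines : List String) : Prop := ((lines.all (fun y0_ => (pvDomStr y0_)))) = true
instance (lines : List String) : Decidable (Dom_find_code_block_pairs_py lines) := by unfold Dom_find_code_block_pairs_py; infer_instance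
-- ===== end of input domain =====

-- B replaces A's collect-indices / odd-check / stride-2 comprehension with a single-pass
-- state machine that emits a pair at each closing fence (objective: simpler).

-- ===== PORT A =====
-- line.strip().startswith('```')  (the same test appears verbatim in both Pythons)
def pvIsFence (s : String) : Bool := PySem.Str.startswith (PySem.Str.strip s) "```"

def find_code_block_pairs_py (lines : List String) : List (Int × Int) :=
  let tick_lines : List Int :=
    (PySem.List.enumerate lines 0).foldl
      (fun acc p => if pvIsFence p.2 then acc ++ [p.1] else acc) []
  if tick_lines.length % 2 ≠ 0 then []
  else
    -- tick_lines[i], tick_lines[i+1]: in range under the even-length guard; ported via pyGetD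
    (PySem.List.pyRange 0 (tick_lines.length : Int) 2).map
      (fun i => (PySem.List.pyGetD tick_lines i 0, PySem.List.pyGetD tick_lines (i + 1) 0))

-- ===== PORT B =====
-- loop body of Source B: state = (start, pairs)
def pvStep (st : Option Int × List (Int × Int)) (p : Int × String) :
    Option Int × List (Int × Int) :=
  if pvIsFence p.2 then
    match st.1 with
    | none => (some p.1, st.2)
    | some s => (none, st.2 ++ [(s, p.1)])
  else st

def find_code_block_pairs_py_alt (lines : List String) : List (Int × Int) :=
  match (PySem.List.enumerate lines 0).foldl pvStep (none, []) with
  | (some _, _) => []      -- an unmatched fence remains open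
  | (none, pairs) => pairs

-- ===== PRECONDITION & SPEC =====
def Spec_find_code_block_pairs_py (lines : List String) (out : List (Int × Int)) : Prop := out = find_code_block_pairs_py_alt lines
instance (lines : List String) (out : List (Int × Int)) : Decidable (Spec_find_code_block_pairs_py lines out) := by unfold Spec_find_code_block_pairs_py; infer_instance

-- ===== CLAIM (what is proved, stated in full; the proofs are below) =====
def Claim_equal_find_code_block_pairs_py : Prop := ∀ (lines : List String), Dom_find_code_block_pairs_py lines → Spec_find_code_block_pairs_py lines (find_code_block_pairs_py lines)

-- ===== LEMMAS AND PROOFS =====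

-- consecutive pairing of a list of indices
def pairUp : List Int → List (Int × Int)
  | [] => []
  | [_] => []
  | a :: b :: r => (a, b) :: pairUp r

-- the state machine of B, abstracted to the fence indices only
def smRun : List Int → (Option Int × List (Int × Int)) → (Option Int × List (Int × Int))
  | [], st => st
  | i :: t, (none, acc) => smRun t (some i, acc)
  | i :: t, (some s, acc) => smRun t (none, acc ++ [(s, i)])

theorem ticks_foldl (l : List (Int × String)) (acc : List Int) :
    l.foldl (fun acc p => if pvIsFence p.2 then acc ++ [p.1] else acc) acc
      = acc ++ (l.filter (fun p => pvIsFence p.2)).map Prod.fst := by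
  induction l generalizing acc with
  | nil => simp
  | cons p l ih =>
    simp only [List.foldl_cons, List.filter_cons]
    by_cases h : pvIsFence p.2 = true
    · simp [h, ih]
    · simp [h, ih]

theorem foldl_step_eq_smRun (l : List (Int × String)) (st : Option Int × List (Int × Int)) :
    l.foldl pvStep st = smRun ((l.filter (fun p => pvIsFence p.2)).map Prod.fst) st := by
  induction l generalizing st with
  | nil => simp [smRun]
  | cons p l ih =>
    obtain ⟨s?, acc⟩ := st
    simp only [List.foldl_cons, List.filter_cons, pvStep]
    by_cases h : pvIsFence p.2 = true
    · cases s? <;> simp [h, ih, smRun]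
    · simp [h, ih]

theorem smRun_even (t : List Int) (acc : List (Int × Int)) (h : t.length % 2 = 0) :
    smRun t (none, acc) = (none, acc ++ pairUp t) := by
  induction t using pairUp.induct generalizing acc with
  | case1 => simp [smRun, pairUp]
  | case2 a => simp at h
  | case3 a b r ih =>
    simp only [List.length_cons] at h
    simp only [smRun]
    rw [ih (acc ++ [(a, b)]) (by omega)]
    simp [pairUp]

theorem smRun_odd (t : List Int) (acc : List (Int × Int)) (h : t.length % 2 = 1) :
    (smRun t (none, acc)).1.isSome := by
  induction t using pairUp.induct generalizing acc with
  | case1 => simp at h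
  | case2 a => simp [smRun]
  | case3 a b r ih =>
    simp only [List.length_cons] at h
    simpa [smRun] using ih (acc ++ [(a, b)]) (by omega)

theorem range_pair_aux (t : List Int) (m : Nat) (hm : t.length = 2 * m) :
    (List.range m).map (fun k => (t.getD (2 * k) 0, t.getD (2 * k + 1) 0)) = pairUp t := by
  induction t using pairUp.induct generalizing m with
  | case1 =>
    have : m = 0 := by simp at hm; omega
    simp [this, pairUp]
  | case2 a => simp at hm; omega
  | case3 a b r ih =>
    simp only [List.length_cons] at hm
    obtain ⟨m', rfl⟩ : ∃ m', m = m' + 1 := ⟨m - 1, by omega⟩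
    rw [List.range_succ_eq_map]
    simp only [List.map_cons, List.map_map]
    rw [pairUp]
    congr 1
    rw [← ih m' (by omega)]
    apply List.map_congr_left
    intro k hk
    simp only [Function.comp_apply, Nat.succ_eq_add_one]
    have h1 : 2 * (k + 1) = 2 * k + 2 := by ring
    have h2 : 2 * (k + 1) + 1 = (2 * k + 1) + 2 := by ring
    rw [h2, h1]
    rfl

theorem map_pyRange_two_pairUp (t : List Int) (h : t.length % 2 = 0) :
    (PySem.List.pyRange 0 (t.length : Int) 2).map
      (fun i => (PySem.List.pyGetD t i 0, PySem.List.pyGetD t (i + 1) 0)) = pairUp t := by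
  obtain ⟨m, hm⟩ : ∃ m, t.length = 2 * m := ⟨t.length / 2, by omega⟩
  have hm' : (t.length : Int) = 2 * (m : Int) := by exact_mod_cast congrArg (Nat.cast (R := Int)) hm
  rw [PySem.List.pyRange_of_pos 0 (t.length : Int) (by norm_num)]
  have hcount : (if (0:Int) < (t.length : Int) then (((t.length : Int) - 0 + 2 - 1) / 2).toNat else 0) = m := by
    split_ifs with h0 <;> omega
  rw [hcount, List.map_map, ← range_pair_aux t m hm]
  apply List.map_congr_left
  intro k hk
  simp only [Function.comp_apply, zero_add]
  have e1 : (2 : Int) * (k : Int) = ((2 * k : Nat) : Int) := by push_cast; ring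
  have e2 : (2 : Int) * (k : Int) + 1 = ((2 * k + 1 : Nat) : Int) := by push_cast; ring
  rw [e2, e1, PySem.List.pyGetD_natCast, PySem.List.pyGetD_natCast]

-- ===== VERDICT (by name: the statement is the Claim_ definition above) =====
theorem find_code_block_pairs_py_spec : Claim_equal_find_code_block_pairs_py := by
  unfold Claim_equal_find_code_block_pairs_py
  intro lines _
  unfold Spec_find_code_block_pairs_py
  simp only [find_code_block_pairs_py, find_code_block_pairs_py_alt]
  rw [ticks_foldl, foldl_step_eq_smRun]
  simp only [List.nil_append]
  set t := ((PySem.List.enumerate lines 0).filter (fun p => pvIsFence p.2)).map Prod.fst with ht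
  by_cases h : t.length % 2 = 0
  · rw [smRun_even t [] h]
    simp [h, map_pyRange_two_pairUp t h]
  · have h1 : t.length % 2 = 1 := by omega
    have hs := smRun_odd t [] h1
    rw [if_pos h]
    rcases hrun : smRun t (none, []) with ⟨s?, acc⟩
    cases s? with
    | none => rw [hrun] at hs; simp at hs
    | some s => rfl
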